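-- pv_equiv track=rewrite | github.com/Count-group/project1 | results/codes/算法竞赛/kimi/CF2066D2_2.py | compute_sequence
-- ===== SOURCE A (Python) =====
-- def compute_sequence(n, initial_terms):
--     # Precompute the first 2n terms of the sequence
--     sequence = initial_terms[:]
--     for i in range(n, 2 * n):
--         xor_sum = 0
--         for j in range((i + 1) // 2):
--             xor_sum ^= sequence[j]
--         sequence.append(xor_sum)
--     return sequence
-- ===== SOURCE B (Python) =====
-- def compute_sequence(n, initial_terms):
--     # Maintain a running prefix XOR and a pointer k so that each new term
--     # extends the previous prefix instead of re-scanning it: O(n) total.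
--     sequence = list(initial_terms)
--     prefix = 0
--     k = 0  # invariant: prefix == XOR of sequence[0:k]
--     for i in range(n, 2 * n):
--         m = (i + 1) // 2
--         while k < m:
--             prefix ^= sequence[k]
--             k += 1
--         sequence.append(prefix)
--     return sequence
-- ===== Notes on version B (the rewrite author's own statement) =====
-- stated objective: faster
-- what changed: B maintains a running prefix-XOR and a pointer that only advances, so each appended term costs amortized O(1) instead of re-XORing the whole prefix every iteration.
import Mathlib
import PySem

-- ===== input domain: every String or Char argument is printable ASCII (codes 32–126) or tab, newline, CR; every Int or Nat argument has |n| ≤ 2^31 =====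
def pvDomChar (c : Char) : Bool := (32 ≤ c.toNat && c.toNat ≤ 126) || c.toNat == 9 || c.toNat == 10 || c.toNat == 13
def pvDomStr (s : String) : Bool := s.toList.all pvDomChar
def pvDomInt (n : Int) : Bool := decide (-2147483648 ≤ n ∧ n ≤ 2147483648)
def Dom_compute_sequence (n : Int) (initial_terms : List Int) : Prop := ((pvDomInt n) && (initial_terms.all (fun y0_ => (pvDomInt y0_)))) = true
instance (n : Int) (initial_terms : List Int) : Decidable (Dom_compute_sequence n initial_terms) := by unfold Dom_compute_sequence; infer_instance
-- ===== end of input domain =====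

-- B replaces A's O(n^2) re-scan of the prefix by a running prefix XOR with an
-- advancing pointer (amortized O(1) per appended term); return values agree on Pre_.

-- ===== PORT A =====
-- inner loop: xor_sum over sequence[j] for j in range((i+1)//2)
def pvAStep (seq : List Int) (i : Int) : List Int :=
  let xorSum := (PySem.List.pyRange 0 (PySem.Int.floordiv (i + 1) 2) 1).foldl
    (fun acc j => PySem.Int.bxor acc (PySem.List.pyGetD seq j 0)) 0
  seq ++ [xorSum]

def compute_sequence (n : Int) (initial_terms : List Int) : List Int :=
  (PySem.List.pyRange n (2 * n) 1).foldl pvAStep initial_terms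

-- ===== PORT B =====
-- the 'while k < m' loop, as a fold over range(k, m): state (prefix, k)
def pvBAdvance (seq : List Int) (st : Int × Int) (m : Int) : Int × Int :=
  (PySem.List.pyRange st.2 m 1).foldl
    (fun p j => (PySem.Int.bxor p.1 (PySem.List.pyGetD seq j 0), p.2 + 1)) st

-- one iteration of B's for-loop: state (sequence, prefix, k)
def pvBStep (st : List Int × Int × Int) (i : Int) : List Int × Int × Int :=
  let m := PySem.Int.floordiv (i + 1) 2
  let pk := pvBAdvance st.1 (st.2.1, st.2.2) m
  (st.1 ++ [pk.1], pk.1, pk.2)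

def compute_sequence_alt (n : Int) (initial_terms : List Int) : List Int :=
  ((PySem.List.pyRange n (2 * n) 1).foldl pvBStep (initial_terms, 0, 0)).1

-- ===== PRECONDITION & SPEC =====
-- Pre_ excludes exactly the inputs on which A raises IndexError: a positive n
-- with fewer than (n+1)//2 initial terms (the first appended term already reads
-- past the end). B raises there too.
def Pre_compute_sequence (n : Int) (initial_terms : List Int) : Prop :=
  n ≤ 0 ∨ PySem.Int.floordiv (n + 1) 2 ≤ (initial_terms.length : Int)
instance (n : Int) (initial_terms : List Int) : Decidable (Pre_compute_sequence n initial_terms) := by unfold Pre_compute_sequence; infer_instance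

def pvWitness_compute_sequence : Int × List Int := (3, [4, 7])

def Spec_compute_sequence (n : Int) (initial_terms : List Int) (out : List Int) : Prop := out = compute_sequence_alt n initial_terms
instance (n : Int) (initial_terms : List Int) (out : List Int) : Decidable (Spec_compute_sequence n initial_terms out) := by unfold Spec_compute_sequence; infer_instance

-- ===== CLAIM (what is proved, stated in full; the proofs are below) =====
def Claim_equal_compute_sequence : Prop := ∀ (n : Int) (initial_terms : List Int), Dom_compute_sequence n initial_terms → Pre_compute_sequence n initial_terms → Spec_compute_sequence n initial_terms (compute_sequence n initial_terms)

-- ===== LEMMAS AND PROOFS =====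

-- the xor fold of A over a prefix of the sequence, as an abbreviation for statements
def pvXor (seq : List Int) (a b : Int) (init : Int) : Int :=
  (PySem.List.pyRange a b 1).foldl (fun acc j => PySem.Int.bxor acc (PySem.List.pyGetD seq j 0)) init

-- B's while-loop advances the pointer to m and xors the skipped entries
lemma pvBAdvance_eq (seq : List Int) (pfx k m : Int) (hkm : k ≤ m) :
    pvBAdvance seq (pfx, k) m = (pvXor seq k m pfx, m) := by
  unfold pvBAdvance pvXor
  obtain ⟨c, hc⟩ : ∃ c : Nat, m - k = (c : Int) := ⟨(m - k).toNat, by omega⟩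
  induction c generalizing k pfx with
  | zero => rw [PySem.List.pyRange_one_eq_nil (by omega)]; simp; omega
  | succ c ih =>
    rw [PySem.List.pyRange_one_cons (by omega)]
    simp only [List.foldl_cons]
    exact ih (PySem.Int.bxor pfx (PySem.List.pyGetD seq k 0)) (k + 1) (by omega) (by omega)

-- the fold that defines pfx only reads indices < b, so appending does not change it
lemma pvXor_append (seq : List Int) (x : Int) (a b init : Int) (ha : 0 ≤ a)
    (hb : b ≤ (seq.length : Int)) :
    pvXor (seq ++ [x]) a b init = pvXor seq a b init := by
  unfold pvXor
  refine PySem.List.foldl_congr_mem _ _ _ _ ?_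
  intro acc j hj
  rw [PySem.List.mem_pyRange_one] at hj
  rw [PySem.List.pyGetD_eq_getElem _ _ (by omega) (by simp; omega),
      PySem.List.pyGetD_eq_getElem _ _ (by omega) (by omega)]
  congr 1
  exact List.getElem_append_left (by omega)

-- splitting the xor fold at k
lemma pvXor_split (seq : List Int) (k m init : Int) (hk : 0 ≤ k) (hkm : k ≤ m) :
    pvXor seq 0 m init = pvXor seq k m (pvXor seq 0 k init) := by
  unfold pvXor
  rw [PySem.List.pyRange_one_append 0 k m hk hkm, List.foldl_append]

-- main loop invariant
lemma pvLoop_eq (c : Nat) : ∀ (a b : Int) (seq : List Int) (pfx k : Int),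
    b - a = (c : Int) →
    0 ≤ k → k ≤ PySem.Int.floordiv (a + 1) 2 →
    (a < b → PySem.Int.floordiv (a + 1) 2 ≤ (seq.length : Int)) →
    pfx = pvXor seq 0 k 0 →
    ((PySem.List.pyRange a b 1).foldl pvBStep (seq, pfx, k)).1
      = (PySem.List.pyRange a b 1).foldl pvAStep seq := by
  induction c with
  | zero =>
    intro a b seq pfx k hc _ _ _ _
    rw [PySem.List.pyRange_one_eq_nil (by omega)]
    rfl
  | succ c ih =>
    intro a b seq pfx k hc hk0 hkm hlen hpfx
    have e1 : PySem.Int.floordiv (a + 1) 2 = (a + 1) / 2 :=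
      PySem.Int.floordiv_eq_ediv_of_pos (by norm_num)
    have e2 : PySem.Int.floordiv (a + 1 + 1) 2 = (a + 1 + 1) / 2 :=
      PySem.Int.floordiv_eq_ediv_of_pos (by norm_num)
    set m := PySem.Int.floordiv (a + 1) 2 with hmdef
    have hmlen : m ≤ (seq.length : Int) := hlen (by omega)
    rw [PySem.List.pyRange_one_cons (by omega)]
    simp only [List.foldl_cons]
    have hstep : pvBStep (seq, pfx, k) a = (seq ++ [pvXor seq 0 m 0], pvXor seq 0 m 0, m) := by
      unfold pvBStep
      simp only [← hmdef]
      rw [pvBAdvance_eq seq pfx k m hkm, hpfx, ← pvXor_split seq k m 0 hk0 hkm]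
    have hastep : pvAStep seq a = seq ++ [pvXor seq 0 m 0] := by
      simp only [pvAStep, pvXor, ← hmdef]
    rw [hstep, hastep]
    refine ih (a + 1) b (seq ++ [pvXor seq 0 m 0]) (pvXor seq 0 m 0) m (by omega) (by omega)
      (by rw [e2]; omega) ?_ ?_
    · intro _
      rw [e2]
      simp only [List.length_append, List.length_cons, List.length_nil]
      push_cast
      omega
    · exact (pvXor_append seq (pvXor seq 0 m 0) 0 m 0 le_rfl hmlen).symm

-- ===== VERDICT (by name: the statement is the Claim_ definition above) =====
theorem compute_sequence_spec : Claim_equal_compute_sequence := by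
  intro n initial_terms _hd hpre
  unfold Spec_compute_sequence compute_sequence compute_sequence_alt
  by_cases hn : n ≤ 0
  · rw [PySem.List.pyRange_one_eq_nil (by omega)]; rfl
  · refine (pvLoop_eq (2 * n - n).toNat n (2 * n) initial_terms 0 0 (by omega) le_rfl ?_ ?_ ?_).symm
    · rw [PySem.Int.floordiv_eq_ediv_of_pos (by norm_num)]; omega
    · intro _
      rcases hpre with h | h
      · omega
      · exact h
    · simp [pvXor, PySem.List.pyRange_one_eq_nil (by omega : (0:Int) ≤ 0)]
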